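-- pv_equiv track=rewrite | github.com/DooDuZ/sparta_python | hanghae/day6/prob9.py | solution
-- ===== SOURCE A (Python) =====
-- from collections import deque
--
-- def solution(params):
--     answer = []
--
--     queue_stack = deque()
--
--     qs, elements, insert = params
--
--     # q인 경우에만 순서대로 넣고
--     for i, q in enumerate(qs):
--         if q == 0:
--             queue_stack.append(elements[i])
--
--     for value in insert:
--         queue_stack.appendleft(value)
--         answer.append(queue_stack.pop())
--
--     return answer
-- ===== SOURCE B (Python) =====
-- def solution(params):
--     qs, elements, insert = params
--     filtered = [elements[i] for i, q in enumerate(qs) if q == 0]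
--     insert = list(insert)
--     return (filtered[::-1] + insert)[:len(insert)]
-- ===== Notes on version B (the rewrite author's own statement) =====
-- stated objective: simpler
-- what changed: Replaces the deque push-front/pop-back simulation loop with a closed-form slice: reverse the filtered elements, append the inserted values, and truncate to len(insert).
import Mathlib
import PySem

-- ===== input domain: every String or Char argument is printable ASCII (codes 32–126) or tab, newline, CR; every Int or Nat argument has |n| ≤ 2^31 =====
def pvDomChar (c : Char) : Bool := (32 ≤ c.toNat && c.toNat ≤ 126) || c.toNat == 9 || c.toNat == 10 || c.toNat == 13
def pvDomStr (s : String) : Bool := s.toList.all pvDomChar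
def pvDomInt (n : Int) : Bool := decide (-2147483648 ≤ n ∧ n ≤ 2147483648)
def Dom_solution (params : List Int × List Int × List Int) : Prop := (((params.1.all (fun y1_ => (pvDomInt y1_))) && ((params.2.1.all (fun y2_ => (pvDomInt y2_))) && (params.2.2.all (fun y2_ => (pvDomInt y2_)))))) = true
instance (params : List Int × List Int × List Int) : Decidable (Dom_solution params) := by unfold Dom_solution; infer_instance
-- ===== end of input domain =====

-- B replaces A's deque push-front/pop-back loop with reverse-append-truncate; objective: simpler.

-- ===== PORT A =====
-- literal port of A: build the queue by appending, then for each inserted value push front and pop back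
def solution (params : List Int × List Int × List Int) : List Int :=
  let qs := params.1
  let elements := params.2.1
  let insert := params.2.2
  let queue : List Int := (PySem.List.enumerate qs).foldl
    (fun acc p => if p.2 = 0 then acc ++ [(PySem.List.pyGet? elements p.1).getD 0] else acc) []
  -- elements[i]: out-of-range (IndexError) is excluded by Pre_solution; getD 0 never fires there
  let st := insert.foldl
    (fun (st : List Int × List Int) v =>
      let q2 := v :: st.1            -- appendleft
      (q2.dropLast, st.2 ++ [q2.getLast!]))   -- pop from the right (q2 is nonempty)
    (queue, [])
  st.2

-- ===== PORT B =====
def solution_alt (params : List Int × List Int × List Int) : List Int :=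
  let qs := params.1
  let elements := params.2.1
  let insert := params.2.2
  let filtered := ((PySem.List.enumerate qs).filter (fun p => p.2 = 0)).map
    (fun p => (PySem.List.pyGet? elements p.1).getD 0)
  ((filtered.reverse ++ insert).take insert.length)

-- ===== PRECONDITION & SPEC =====
-- Pre_ excludes exactly the inputs where elements[i] raises IndexError in both A and B:
-- a position i with qs[i] == 0 but i >= len(elements).
def Pre_solution (params : List Int × List Int × List Int) : Prop :=
  ∀ p ∈ PySem.List.enumerate params.1, p.2 = 0 → p.1 < (params.2.1.length : Int)
instance (params : List Int × List Int × List Int) : Decidable (Pre_solution params) := by unfold Pre_solution; infer_instance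
def pvWitness_solution : (List Int × List Int × List Int) := ([0, 1, 0], [5, 6, 7], [8, 9])

def Spec_solution (params : List Int × List Int × List Int) (out : List Int) : Prop := out = solution_alt params
instance (params : List Int × List Int × List Int) (out : List Int) : Decidable (Spec_solution params out) := by unfold Spec_solution; infer_instance

-- ===== CLAIM (what is proved, stated in full; the proofs are below) =====
def Claim_equal_solution : Prop := ∀ (params : List Int × List Int × List Int), Dom_solution params → Pre_solution params → Spec_solution params (solution params)

-- ===== LEMMAS AND PROOFS =====

-- the drain loop on queue r.reverse produces acc ++ (r ++ ins).take ins.length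
lemma drain_loop (ins : List Int) : ∀ (r acc : List Int),
    (ins.foldl (fun (st : List Int × List Int) v =>
        let q2 := v :: st.1
        (q2.dropLast, st.2 ++ [q2.getLast!])) (r.reverse, acc)).2
      = acc ++ (r ++ ins).take ins.length := by
  induction ins with
  | nil => intro r acc; simp
  | cons v rest ih =>
    intro r acc
    cases r with
    | nil =>
      simp only [List.foldl_cons, List.reverse_nil]
      have h1 : (([] : List Int) ++ v :: rest).take (rest.length + 1) = v :: rest := by simp
      simpa [h1] using ih [] (acc ++ [v])
    | cons b r' =>
      simp only [List.foldl_cons, List.reverse_cons]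
      have hcons : v :: (r'.reverse ++ [b]) = (v :: r'.reverse) ++ [b] := by
        simp
      have hl : (v :: (r'.reverse ++ [b])).getLast! = b := by
        rw [hcons]; simp [List.getLast!]
      have hd : (v :: (r'.reverse ++ [b])).dropLast = (r' ++ [v]).reverse := by
        rw [hcons, List.dropLast_concat]; simp
      rw [hl, hd]
      have := ih (r' ++ [v]) (acc ++ [b])
      simp only [this]
      simp [List.take_succ_cons]

-- ===== VERDICT (by name: the statement is the Claim_ definition above) =====
theorem solution_spec : Claim_equal_solution := by
  intro params _ _
  unfold Spec_solution solution solution_alt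
  have hq : (PySem.List.enumerate params.1).foldl
      (fun acc p => if p.2 = 0 then acc ++ [(PySem.List.pyGet? params.2.1 p.1).getD 0] else acc) []
      = ((PySem.List.enumerate params.1).filter (fun p => p.2 = 0)).map
          (fun p => (PySem.List.pyGet? params.2.1 p.1).getD 0) := by
    induction PySem.List.enumerate params.1 using List.reverseRecOn with
    | nil => simp
    | append_singleton l x ih =>
      by_cases h : x.2 = 0 <;> simp [List.foldl_append, ih, List.filter_append, h]
  have := drain_loop params.2.2
    ((((PySem.List.enumerate params.1).filter (fun p => p.2 = 0)).map
      (fun p => (PySem.List.pyGet? params.2.1 p.1).getD 0)).reverse) []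
  simp only [hq]
  simpa using this
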